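-- pv_equiv track=rewrite | github.com/razi24k/python | backendbaz/delete-starting-evens.py | delete_starting_evens
-- ===== SOURCE A (Python) =====
-- def delete_starting_evens(arr):
--     new_arr = []
--     found_odd = False
--     for i in arr:
--         if not found_odd and i % 2 == 0:
--             continue
--         else:
--             found_odd = True
--             new_arr.append(i)
--     return new_arr
-- ===== SOURCE B (Python) =====
-- def delete_starting_evens(arr):
--     idx = next((i for i, x in enumerate(arr) if x % 2 != 0), len(arr))
--     return arr[idx:]
-- ===== Notes on version B (the rewrite author's own statement) =====
-- stated objective: simpler
-- what changed: Replaces A's per-element accumulation under a found_odd flag with a single scan that locates the index of the first odd element and returns the slice from there.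
import Mathlib
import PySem

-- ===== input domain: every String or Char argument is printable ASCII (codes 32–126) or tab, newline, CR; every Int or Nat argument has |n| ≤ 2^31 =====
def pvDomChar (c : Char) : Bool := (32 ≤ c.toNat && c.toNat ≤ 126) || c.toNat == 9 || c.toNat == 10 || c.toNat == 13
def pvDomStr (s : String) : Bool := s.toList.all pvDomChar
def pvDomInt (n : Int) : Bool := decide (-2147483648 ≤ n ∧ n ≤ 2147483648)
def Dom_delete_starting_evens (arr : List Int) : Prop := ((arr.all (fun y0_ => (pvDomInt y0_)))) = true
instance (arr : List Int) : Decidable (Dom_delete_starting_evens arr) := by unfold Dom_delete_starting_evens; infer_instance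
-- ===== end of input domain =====

-- B locates the index of the first odd element in one scan and slices there, instead of A's
-- per-element accumulation under a found_odd flag (objective: simpler).

-- ===== PORT A =====
def delete_starting_evens (arr : List Int) : List Int :=
  (arr.foldl (fun (st : List Int × Bool) i =>
    if !st.2 && (PySem.Int.mod i 2 == 0) then st
    else (st.1 ++ [i], true)) ([], false)).1

-- ===== PORT B =====
-- idx = next((i for i, x in enumerate(arr) if x % 2 != 0), len(arr))
def firstOddIdx : List Int → Nat → Nat
  | [], n => n
  | x :: xs, n => if PySem.Int.mod x 2 ≠ 0 then n else firstOddIdx xs (n + 1)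

def delete_starting_evens_alt (arr : List Int) : List Int :=
  PySem.List.slice arr (some ((firstOddIdx arr 0 : Nat) : Int)) none

-- ===== PRECONDITION & SPEC =====
def Spec_delete_starting_evens (arr : List Int) (out : List Int) : Prop := out = delete_starting_evens_alt arr
instance (arr : List Int) (out : List Int) : Decidable (Spec_delete_starting_evens arr out) := by unfold Spec_delete_starting_evens; infer_instance

-- ===== CLAIM (what is proved, stated in full; the proofs are below) =====
def Claim_equal_delete_starting_evens : Prop := ∀ (arr : List Int), Dom_delete_starting_evens arr → Spec_delete_starting_evens arr (delete_starting_evens arr)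

-- ===== LEMMAS AND PROOFS =====

-- once found_odd is true, the fold appends every remaining element
theorem foldA_true (l : List Int) (acc : List Int) :
    (l.foldl (fun (st : List Int × Bool) i =>
      if !st.2 && (PySem.Int.mod i 2 == 0) then st
      else (st.1 ++ [i], true)) (acc, true)).1 = acc ++ l := by
  induction l generalizing acc with
  | nil => simp
  | cons x xs ih =>
    rw [List.foldl_cons, if_neg (by simp)]
    rw [ih]
    simp

theorem firstOddIdx_shift (l : List Int) (n : Nat) :
    firstOddIdx l n = firstOddIdx l 0 + n := by
  induction l generalizing n with
  | nil => simp [firstOddIdx]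
  | cons x xs ih =>
    by_cases h : PySem.Int.mod x 2 ≠ 0
    · simp only [firstOddIdx]
      rw [if_pos h, if_pos h]
      omega
    · simp only [firstOddIdx]
      rw [if_neg h, if_neg h, ih (n + 1), ih 1]
      omega

theorem main_eq (arr : List Int) :
    delete_starting_evens arr = delete_starting_evens_alt arr := by
  induction arr with
  | nil => rfl
  | cons x xs ih =>
    by_cases h : PySem.Int.mod x 2 = 0
    · have hidx : firstOddIdx (x :: xs) 0 = firstOddIdx xs 0 + 1 := by
        simp only [firstOddIdx]
        rw [if_neg (by simp [(PySem.Int.mod_eq_zero_iff_dvd x 2).mp h]), firstOddIdx_shift xs 1]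
      have hA : delete_starting_evens (x :: xs) = delete_starting_evens xs := by
        simp only [delete_starting_evens, List.foldl_cons]
        rw [if_pos (by simp [(PySem.Int.mod_eq_zero_iff_dvd x 2).mp h])]
      have hB : delete_starting_evens_alt (x :: xs) = delete_starting_evens_alt xs := by
        simp only [delete_starting_evens_alt, hidx, PySem.List.slice_from_natCast]
        simp
      rw [hA, hB]; exact ih
    · have hidx : firstOddIdx (x :: xs) 0 = 0 := by
        simp only [firstOddIdx]; rw [if_pos h]
      simp only [delete_starting_evens, delete_starting_evens_alt, List.foldl_cons, hidx]
      have hd : ¬ (2:Int) ∣ x := fun d => h ((PySem.Int.mod_eq_zero_iff_dvd x 2).mpr d)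
      rw [if_neg (by simp; omega), foldA_true, PySem.List.slice_from_natCast]
      simp

-- ===== VERDICT (by name: the statement is the Claim_ definition above) =====
theorem delete_starting_evens_spec : Claim_equal_delete_starting_evens := by
  intro arr _
  exact main_eq arr
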